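-- pv_equiv track=rewrite | github.com/iansedano/codingame_solutions | Skynet_revolution/skynet_revolution_2.py | get_adjacent_nodes
-- ===== SOURCE A (Python) =====
-- def get_adjacent_nodes(node, links):
--     adjacent_nodes = []
--     for l in links:
--         if l[0] == node:
--             if l[1] not in adjacent_nodes:
--                 adjacent_nodes.append(l[1])
--         if l[1] == node:
--             if l[0] not in adjacent_nodes:
--                 adjacent_nodes.append(l[0])
--     return adjacent_nodes
-- ===== SOURCE B (Python) =====
-- def get_adjacent_nodes(node, links):
--     # stage 1: all neighbour occurrences, duplicates included, in link order
--     candidates = [x for a, b in links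
--                     for x in (([b] if a == node else []) + ([a] if b == node else []))]
--
--     # stage 2: first-occurrence dedup by recursion: keep the head, filter all
--     # its other occurrences out of the tail, recurse on what is left
--     def uniq(xs):
--         if not xs:
--             return []
--         head = xs[0]
--         return [head] + uniq([x for x in xs[1:] if x != head])
--
--     return uniq(candidates)
-- ===== Notes on version B (the rewrite author's own statement) =====
-- stated objective: alternative
-- what changed: B builds the full multiset of neighbour occurrences with a flat comprehension and then deduplicates by recursion (keep the head, filter its other occurrences from the tail, recurse), instead of A's single pass that checks membership in the growing result before every append.
import Mathlib
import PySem

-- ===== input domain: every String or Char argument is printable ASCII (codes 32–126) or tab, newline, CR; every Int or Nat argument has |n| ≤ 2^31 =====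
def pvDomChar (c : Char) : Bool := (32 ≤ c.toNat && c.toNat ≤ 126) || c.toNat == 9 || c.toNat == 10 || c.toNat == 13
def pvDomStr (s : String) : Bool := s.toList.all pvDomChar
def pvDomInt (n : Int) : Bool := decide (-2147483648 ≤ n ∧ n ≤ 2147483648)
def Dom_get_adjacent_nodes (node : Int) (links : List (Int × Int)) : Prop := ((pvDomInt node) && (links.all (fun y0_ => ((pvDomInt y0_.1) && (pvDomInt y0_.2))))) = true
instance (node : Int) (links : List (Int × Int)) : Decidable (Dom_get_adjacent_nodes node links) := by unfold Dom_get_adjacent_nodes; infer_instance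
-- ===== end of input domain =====

-- B replaces A's incremental membership-checked appends by a flat candidate
-- comprehension followed by a recursive head-and-filter dedup (objective: alternative).

-- ===== PORT A =====
-- loop body of A: conditionally append l.2 then l.1, each guarded by 'not in' on the result so far
def pvStepA (node : Int) (acc : List Int) (l : Int × Int) : List Int :=
  let acc1 := if l.1 == node then (if acc.contains l.2 then acc else acc ++ [l.2]) else acc
  if l.2 == node then (if acc1.contains l.1 then acc1 else acc1 ++ [l.1]) else acc1

def get_adjacent_nodes (node : Int) (links : List (Int × Int)) : List Int :=
  links.foldl (pvStepA node) []

-- ===== PORT B =====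
-- per-link slice of the candidate comprehension
def pvEmit (node : Int) (l : Int × Int) : List Int :=
  (if l.1 == node then [l.2] else []) ++ (if l.2 == node then [l.1] else [])

-- uniq: keep the head, filter its other occurrences from the tail, recurse
def pvUniq : List Int → List Int
  | [] => []
  | x :: xs => x :: pvUniq (xs.filter (fun y => y ≠ x))
termination_by xs => xs.length
decreasing_by
  simpa using (List.length_filter_le _ _).trans (List.length_attach (l := xs)).le

def get_adjacent_nodes_alt (node : Int) (links : List (Int × Int)) : List Int :=
  pvUniq (links.flatMap (pvEmit node))

-- ===== PRECONDITION & SPEC =====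
def Spec_get_adjacent_nodes (node : Int) (links : List (Int × Int)) (out : List Int) : Prop := out = get_adjacent_nodes_alt node links
instance (node : Int) (links : List (Int × Int)) (out : List Int) : Decidable (Spec_get_adjacent_nodes node links out) := by unfold Spec_get_adjacent_nodes; infer_instance

-- ===== CLAIM (what is proved, stated in full; the proofs are below) =====
def Claim_equal_get_adjacent_nodes : Prop := ∀ (node : Int) (links : List (Int × Int)), Dom_get_adjacent_nodes node links → Spec_get_adjacent_nodes node links (get_adjacent_nodes node links)

-- ===== LEMMAS AND PROOFS =====

-- A's loop body is exactly set-update by the emitted endpoints of the link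
theorem pvStepA_eq_update (node : Int) (acc : List Int) (l : Int × Int) :
    pvStepA node acc l = PySem.Set.update acc (pvEmit node l) := by
  by_cases h1 : l.1 == node <;> by_cases h2 : l.2 == node <;>
    simp [pvStepA, pvEmit, h1, h2, PySem.Set.update_cons, PySem.Set.update_nil,
      PySem.Set.add]

-- A's whole loop is set-update by the concatenated candidates
theorem pvFoldA_update (node : Int) :
    ∀ (links : List (Int × Int)) (acc : List Int),
      links.foldl (pvStepA node) acc = PySem.Set.update acc (links.flatMap (pvEmit node)) := by
  intro links
  induction links with
  | nil => intro acc; simp [PySem.Set.update_nil]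
  | cons l rest ih =>
      intro acc
      simp only [List.foldl_cons, List.flatMap_cons, PySem.Set.update_append, ih,
        pvStepA_eq_update]

-- peeling one element off a first-occurrence dedup
theorem pvDedup_cons (x : Int) (xs : List Int) :
    PySem.List.dedup (x :: xs) = x :: (PySem.List.dedup xs).filter (fun y => !(y == x)) := by
  simp [PySem.List.dedup, PySem.Set.ofList_cons, PySem.Set.discard]

-- first-occurrence dedup commutes with filter
theorem pvDedup_filter (p : Int → Bool) :
    ∀ (xs : List Int), PySem.List.dedup (xs.filter p) = (PySem.List.dedup xs).filter p := by
  intro xs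
  induction xs with
  | nil => simp [PySem.List.dedup]
  | cons x xs ih =>
      by_cases hp : p x = true
      · simp only [List.filter_cons, hp, if_pos, pvDedup_cons, ih, List.filter_filter]
        refine congrArg (x :: ·) (List.filter_congr ?_)
        intro y _; simp [Bool.and_comm]
      · simp only [List.filter_cons, hp, Bool.false_eq_true, if_neg, not_false_iff,
          pvDedup_cons, ih, List.filter_filter]
        refine List.filter_congr ?_
        intro y hy
        by_cases hyx : y = x
        · subst hyx; simp [hp]
        · simp [hyx]

-- the recursive head-and-filter dedup computes first-occurrence dedup
theorem pvUniq_eq_dedup_len : ∀ (n : Nat) (xs : List Int), xs.length ≤ n → pvUniq xs = PySem.List.dedup xs := by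
  intro n
  induction n with
  | zero =>
      intro xs h
      have : xs = [] := List.length_eq_zero_iff.mp (Nat.le_zero.mp h)
      subst this; simp [pvUniq, PySem.List.dedup]
  | succ n ih =>
      intro xs h
      cases xs with
      | nil => simp [pvUniq, PySem.List.dedup]
      | cons x xs =>
          rw [pvUniq, pvDedup_cons,
            ih _ ((List.length_filter_le _ _).trans (Nat.succ_le_succ_iff.mp h)),
            pvDedup_filter]
          congr 1
          refine List.filter_congr ?_
          intro y _; by_cases hyx : y = x <;> simp [hyx]

theorem pvUniq_eq_dedup (xs : List Int) : pvUniq xs = PySem.List.dedup xs :=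
  pvUniq_eq_dedup_len xs.length xs le_rfl

-- ===== VERDICT (by name: the statement is the Claim_ definition above) =====
theorem get_adjacent_nodes_spec : Claim_equal_get_adjacent_nodes := by
  intro node links _
  show get_adjacent_nodes node links = get_adjacent_nodes_alt node links
  rw [get_adjacent_nodes, get_adjacent_nodes_alt, pvFoldA_update, pvUniq_eq_dedup,
    PySem.Set.update_nil_left, ← PySem.List.dedup_eq_ofList]
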